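-- pv_equiv track=rewrite | github.com/randall-pulido/Lyrics-Generator | helpers.py | sequence_tokens
-- ===== SOURCE A (Python) =====
-- def sequence_tokens(split_data, uncommon_tokens, seq_length=5):
--     '''Partitions a list into sublists that do not contains any of `uncommon_tokens`
--     with length `seq_length`. The first `seq_length` - 1 elements of the sublists
--     are saved to the first resultant list of the returned tuple and the last element of
--     the sublists are saved to the second resultant list of the returned tuple.
--
--     Args:
--         split_data: List to be partitioned.
--         uncommon_tokens: Set with which to filter `split_data`.
--         seq_length: The length of the sequences to partition.
--
--     Returns:
--         A 2-tuple. The first element of the tuple is a list of sequences that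
--         were partitioned from the given list, excluding the last element of each
--         sequence. The second element of the tuple is a list of the last elements
--         of each sequence.
--
--     '''
--     valid_seqs = []
--     end_seq_words = []
--     for i in range(len(split_data) - seq_length):
--         end_slice = i + seq_length + 1
--         if len(set(split_data[i:end_slice]).intersection(uncommon_tokens)) == 0:
--             valid_seqs.append(split_data[i: i + seq_length])
--             end_seq_words.append(split_data[i + seq_length])
--     return valid_seqs, end_seq_words
-- ===== SOURCE B (Python) =====
-- def sequence_tokens(split_data, uncommon_tokens, seq_length=5):
--     uncommon = set(uncommon_tokens)
--     n = len(split_data)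
--     valid_seqs = []
--     end_seq_words = []
--     # number of uncommon tokens currently inside the window [i, i+seq_length)
--     bad = sum(1 for t in split_data[:seq_length] if t in uncommon)
--     for i in range(n - seq_length):
--         bad += split_data[i + seq_length] in uncommon
--         if bad == 0:
--             valid_seqs.append(split_data[i:i + seq_length])
--             end_seq_words.append(split_data[i + seq_length])
--         bad -= split_data[i] in uncommon
--     return valid_seqs, end_seq_words
-- ===== Notes on version B (the rewrite author's own statement) =====
-- stated objective: faster
-- what changed: Replaces A's per-position set construction and intersection over each window by a single sliding count of uncommon tokens in the current window, updated in O(1) per position.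
-- outside the precondition, e.g. on sequence_tokens(['a'], set(), -1): A returns ([[], []], ['a', 'a']), B raises IndexError
import Mathlib
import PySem

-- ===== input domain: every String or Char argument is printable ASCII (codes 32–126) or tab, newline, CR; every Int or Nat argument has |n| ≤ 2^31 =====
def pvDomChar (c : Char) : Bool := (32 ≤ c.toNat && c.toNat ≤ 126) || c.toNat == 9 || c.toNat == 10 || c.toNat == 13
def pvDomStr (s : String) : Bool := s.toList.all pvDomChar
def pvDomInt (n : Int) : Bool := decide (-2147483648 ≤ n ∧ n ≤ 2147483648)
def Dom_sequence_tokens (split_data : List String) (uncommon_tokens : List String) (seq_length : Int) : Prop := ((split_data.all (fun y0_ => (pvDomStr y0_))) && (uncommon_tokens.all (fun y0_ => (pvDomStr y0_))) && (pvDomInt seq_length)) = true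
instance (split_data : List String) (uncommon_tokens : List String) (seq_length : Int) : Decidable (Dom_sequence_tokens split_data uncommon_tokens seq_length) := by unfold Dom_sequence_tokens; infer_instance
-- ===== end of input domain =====

-- B replaces A's per-window set/intersection test by a sliding count of uncommon tokens (asymptotically faster in a timing run).


-- ===== PORT A =====
-- one iteration of A's for-loop (the loop body, verbatim); split_data[i+seq_length] is in
-- range for every loop index when 0 ≤ seq_length (Pre_), so pyGetD's default is never used
def pyStepA (split_data : List String) (uncommon_tokens : List String) (seq_length : Int)
    (acc : List (List String) × List String) (i : Int) : List (List String) × List String :=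
  let end_slice := i + seq_length + 1
  if PySem.Set.len (PySem.Set.inter (PySem.Set.ofList (PySem.List.slice split_data (some i) (some end_slice))) uncommon_tokens) == 0 then
    (acc.1 ++ [PySem.List.slice split_data (some i) (some (i + seq_length))],
     acc.2 ++ [PySem.List.pyGetD split_data (i + seq_length) ""])
  else acc

def sequence_tokens (split_data : List String) (uncommon_tokens : List String) (seq_length : Int) : List (List String) × List String :=
  (PySem.List.pyRange 0 ((split_data.length : Int) - seq_length)).foldl
    (pyStepA split_data uncommon_tokens seq_length) ([], [])

-- ===== PORT B =====
-- one iteration of B's loop: add the right edge to the sliding count `bad`, emit if the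
-- window is clean, drop the left edge; indices are in range under Pre_ (0 ≤ seq_length)
def pyStepB (split_data : List String) (uncommon : PySem.Set String) (seq_length : Int)
    (st : List (List String) × List String × Int) (i : Int) : List (List String) × List String × Int :=
  let right := PySem.List.pyGetD split_data (i + seq_length) ""
  let bad := st.2.2 + (if PySem.Set.contains uncommon right then 1 else 0)
  let st2 := if bad == 0 then
      (st.1 ++ [PySem.List.slice split_data (some i) (some (i + seq_length))], st.2.1 ++ [right], bad)
    else (st.1, st.2.1, bad)
  (st2.1, st2.2.1, st2.2.2 - (if PySem.Set.contains uncommon (PySem.List.pyGetD split_data i "") then 1 else 0))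

def sequence_tokens_alt (split_data : List String) (uncommon_tokens : List String) (seq_length : Int) : List (List String) × List String :=
  let uncommon := PySem.Set.ofList uncommon_tokens
  let n : Int := split_data.length
  let bad : Int := (PySem.List.slice split_data none (some seq_length)).foldl
      (fun c t => if PySem.Set.contains uncommon t then c + 1 else c) 0
  let st := (PySem.List.pyRange 0 (n - seq_length)).foldl (pyStepB split_data uncommon seq_length) ([], [], bad)
  (st.1, st.2.1)

-- ===== PRECONDITION & SPEC =====
-- Pre_ excludes negative seq_length, on which A mixes IndexError crashes with accidental
-- negative-index wraparound results; B raises IndexError there.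
def Pre_sequence_tokens (split_data : List String) (uncommon_tokens : List String) (seq_length : Int) : Prop := 0 ≤ seq_length
instance (split_data : List String) (uncommon_tokens : List String) (seq_length : Int) : Decidable (Pre_sequence_tokens split_data uncommon_tokens seq_length) := by unfold Pre_sequence_tokens; infer_instance
def pvWitness_sequence_tokens : List String × List String × Int := (["a", "b", "c"], ["b"], 1)

def Spec_sequence_tokens (split_data : List String) (uncommon_tokens : List String) (seq_length : Int) (out : List (List String) × List String) : Prop := out = sequence_tokens_alt split_data uncommon_tokens seq_length
instance (split_data : List String) (uncommon_tokens : List String) (seq_length : Int) (out : List (List String) × List String) : Decidable (Spec_sequence_tokens split_data uncommon_tokens seq_length out) := by unfold Spec_sequence_tokens; infer_instance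

-- ===== CLAIM (what is proved, stated in full; the proofs are below) =====
def Claim_equal_sequence_tokens : Prop := ∀ (split_data : List String) (uncommon_tokens : List String) (seq_length : Int), Dom_sequence_tokens split_data uncommon_tokens seq_length → Pre_sequence_tokens split_data uncommon_tokens seq_length → Spec_sequence_tokens split_data uncommon_tokens seq_length (sequence_tokens split_data uncommon_tokens seq_length)

-- ===== LEMMAS AND PROOFS =====

-- the number of uncommon tokens in a list (what B's `bad` counts)
def pvCnt (u : List String) (xs : List String) : Int :=
  ((xs.filter (fun s => PySem.Set.contains (PySem.Set.ofList u) s)).length : Int)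

-- A's emptiness test on the window equals B's count-is-zero test
lemma pvCond_eq (u w : List String) :
    (PySem.Set.len (PySem.Set.inter (PySem.Set.ofList w) u) == 0) = (pvCnt u w == 0) := by
  have h1 : PySem.Set.len (PySem.Set.inter (PySem.Set.ofList w) u) = 0 ↔ ∀ x ∈ w, x ∉ u := by
    unfold PySem.Set.len
    rw [Int.natCast_eq_zero, List.length_eq_zero_iff]
    constructor
    · intro h x hxw hxu
      have hx : x ∈ PySem.Set.inter (PySem.Set.ofList w) u :=
        (PySem.Set.mem_inter _ _ _).2 ⟨(PySem.Set.mem_ofList _ _).2 hxw, hxu⟩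
      rw [h] at hx; exact absurd hx (List.not_mem_nil)
    · intro h
      rcases List.eq_nil_or_concat (PySem.Set.inter (PySem.Set.ofList w) u) with he | ⟨l, x, he⟩
      · exact he
      · exfalso
        have hx : x ∈ PySem.Set.inter (PySem.Set.ofList w) u := by rw [he]; simp
        rcases (PySem.Set.mem_inter _ _ _).1 hx with ⟨hw, hu⟩
        exact h x ((PySem.Set.mem_ofList _ _).1 hw) hu
  have h2 : pvCnt u w = 0 ↔ ∀ x ∈ w, x ∉ u := by
    unfold pvCnt
    rw [Int.natCast_eq_zero, List.length_eq_zero_iff, List.filter_eq_nil_iff]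
    constructor
    · intro h x hxw hxu
      exact h x hxw (by rw [PySem.Set.contains_iff]; exact (PySem.Set.mem_ofList _ _).2 hxu)
    · intro h x hxw hc
      exact h x hxw ((PySem.Set.mem_ofList _ _).1 ((PySem.Set.contains_iff _ _).1 hc))
  rw [Bool.eq_iff_iff]; simp only [beq_iff_eq]; rw [h1, h2]

lemma pvContains_eq (u : List String) (x : String) :
    (PySem.Set.ofList u).contains x = decide (x ∈ u) := by
  rw [Bool.eq_iff_iff]
  simp [PySem.Set.contains_iff, PySem.Set.mem_ofList]

lemma pvCnt_append (u xs ys : List String) : pvCnt u (xs ++ ys) = pvCnt u xs + pvCnt u ys := by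
  simp [pvCnt, List.filter_append]

lemma pvCnt_singleton (u : List String) (x : String) :
    pvCnt u [x] = if PySem.Set.contains (PySem.Set.ofList u) x then 1 else 0 := by
  by_cases h : x ∈ u <;> simp [pvCnt, List.filter_singleton, pvContains_eq, h]

lemma pvCnt_cons (u : List String) (x : String) (xs : List String) :
    pvCnt u (x :: xs) = (if PySem.Set.contains (PySem.Set.ofList u) x then 1 else 0) + pvCnt u xs := by
  by_cases h : x ∈ u <;> simp [pvCnt, List.filter_cons, pvContains_eq, h] <;> omega

-- splitting the (t+1)-wide window at its right / left edge
lemma pvWin_right (l : List String) (k t : Nat) (h : k + t < l.length) :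
    (l.drop k).take (t + 1) = (l.drop k).take t ++ [l.getD (k + t) ""] := by
  rw [List.take_succ]
  have hsome : (l.drop k)[t]? = some (l.getD (k + t) "") := by
    rw [List.getElem?_drop, List.getElem?_eq_getElem h, List.getD_eq_getElem l "" h]
  rw [hsome]; rfl

lemma pvWin_left (l : List String) (k t : Nat) (h : k < l.length) :
    (l.drop k).take (t + 1) = l.getD k "" :: (l.drop (k + 1)).take t := by
  rw [List.drop_eq_getElem_cons h, List.take_succ_cons, List.getD_eq_getElem l "" h]

-- the loop invariant: after k iterations B's lists coincide with A's and B's count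
-- is the number of uncommon tokens in the window starting at k
lemma pvMain (sd u : List String) (t : Nat) (k : Nat) (hk : k + t ≤ sd.length) :
    (PySem.List.pyRange 0 (k : Int)).foldl (pyStepB sd (PySem.Set.ofList u) (t : Int))
        ([], [], pvCnt u (sd.take t))
      = (((PySem.List.pyRange 0 (k : Int)).foldl (pyStepA sd u (t : Int)) ([], [])).1,
         ((PySem.List.pyRange 0 (k : Int)).foldl (pyStepA sd u (t : Int)) ([], [])).2,
         pvCnt u ((sd.drop k).take t)) := by
  induction k with
  | zero =>
      rw [Nat.cast_zero, PySem.List.pyRange_one_eq_nil (le_refl 0)]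
      simp
  | succ k ih =>
      have hk' : k + t ≤ sd.length := by omega
      have hlt : k + t < sd.length := by omega
      have hklt : k < sd.length := by omega
      have hcast : ((k + 1 : Nat) : Int) = (k : Int) + 1 := by push_cast; ring
      rw [hcast, PySem.List.pyRange_one_succ_right (Int.natCast_nonneg k),
        List.foldl_append, List.foldl_append, ih hk']
      simp only [List.foldl_cons, List.foldl_nil]
      -- rewrite A's and B's one step at i = k into a common shape
      unfold pyStepA pyStepB
      have e1 : (k : Int) + (t : Int) = ((k + t : Nat) : Int) := by push_cast; ring
      have e2 : ((k + t : Nat) : Int) + 1 = ((k + t + 1 : Nat) : Int) := by push_cast; ring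
      simp only [e1, e2, PySem.List.pyGetD_natCast, PySem.List.slice_natCast,
        Nat.add_sub_cancel_left, pvCond_eq]
      have hw : (sd.drop k).take (k + t + 1 - k) = (sd.drop k).take t ++ [sd.getD (k + t) ""] := by
        have : k + t + 1 - k = t + 1 := by omega
        rw [this, pvWin_right sd k t hlt]
      rw [hw, pvCnt_append, pvCnt_singleton]
      have hwl : pvCnt u ((sd.drop k).take t) + (if PySem.Set.contains (PySem.Set.ofList u) (sd.getD (k + t) "") then 1 else 0)
          - (if PySem.Set.contains (PySem.Set.ofList u) (sd.getD k "") then 1 else 0)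
          = pvCnt u ((sd.drop (k + 1)).take t) := by
        have h1 : pvCnt u ((sd.drop k).take (t + 1))
            = (if PySem.Set.contains (PySem.Set.ofList u) (sd.getD k "") then 1 else 0) + pvCnt u ((sd.drop (k + 1)).take t) := by
          rw [pvWin_left sd k t hklt, pvCnt_cons]
        have h2 : pvCnt u ((sd.drop k).take (t + 1))
            = pvCnt u ((sd.drop k).take t) + (if PySem.Set.contains (PySem.Set.ofList u) (sd.getD (k + t) "") then 1 else 0) := by
          rw [pvWin_right sd k t hlt, pvCnt_append, pvCnt_singleton]
        omega
      by_cases hc : (pvCnt u ((sd.drop k).take t) + (if PySem.Set.contains (PySem.Set.ofList u) (sd.getD (k + t) "") then 1 else 0) == 0)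
      · simp only [hc, if_pos, if_true]
        refine Prod.ext rfl (Prod.ext rfl ?_)
        simpa using hwl
      · rw [Bool.not_eq_true] at hc
        simp only [hc, if_false, Bool.false_eq_true]
        refine Prod.ext rfl (Prod.ext rfl ?_)
        simpa using hwl

-- ===== VERDICT (by name: the statement is the Claim_ definition above) =====
theorem sequence_tokens_spec : Claim_equal_sequence_tokens := by
  intro sd u s _hdom hpre
  unfold Spec_sequence_tokens
  obtain ⟨t, rfl⟩ : ∃ t : Nat, s = (t : Int) := ⟨s.toNat, (Int.toNat_of_nonneg hpre).symm⟩
  unfold sequence_tokens sequence_tokens_alt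
  simp only []
  have hbad : (PySem.List.slice sd none (some (t : Int))).foldl
      (fun c x => if PySem.Set.contains (PySem.Set.ofList u) x then c + 1 else c) (0 : Int)
      = pvCnt u (sd.take t) := by
    rw [PySem.List.slice_to_natCast, PySem.List.foldl_count_if]
    unfold pvCnt
    rw [List.countP_eq_length_filter,
      show (PySem.Set.ofList u).contains = (fun s => decide (s ∈ u)) from funext (pvContains_eq u)]
    simp [pvContains_eq]
  rw [hbad]
  by_cases hn : (sd.length : Int) - (t : Int) ≤ 0
  · rw [PySem.List.pyRange_one_eq_nil hn]
    simp
  · have hlt : t ≤ sd.length := by omega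
    have hcast : (sd.length : Int) - (t : Int) = ((sd.length - t : Nat) : Int) := by
      rw [Int.natCast_sub hlt]
    rw [hcast, pvMain sd u t (sd.length - t) (by omega)]
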